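-- pv_equiv track=rewrite | github.com/CSerratoDev/LeetCode_Algoritms_Resources_and_Problems | Algorithm/Recursive/palindrome.py | generar_palabras
-- ===== SOURCE A (Python) =====
-- def generar_palabras(alfabeto, n, palabra="", resultado=None):
--     if resultado is None:
--         resultado = []
--     if len(palabra) <= n:
--         if palabra.count("a") % 2 == 0 and palabra.count("b") % 2 == 0:
--             resultado.append(palabra)
--     if len(palabra) == n:
--         return resultado
--     for simbolo in alfabeto:
--         generar_palabras(alfabeto, n, palabra + simbolo, resultado)
--     return resultado
-- ===== SOURCE B (Python) =====
-- def generar_palabras(alfabeto, n, palabra="", resultado=None):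
--     if resultado is None:
--         resultado = []
--     stack = [palabra]
--     while stack:
--         w = stack.pop()
--         if len(w) <= n and w.count("a") % 2 == 0 and w.count("b") % 2 == 0:
--             resultado.append(w)
--         if len(w) != n:
--             for simbolo in reversed(alfabeto):
--                 stack.append(w + simbolo)
--     return resultado
-- ===== Notes on version B (the rewrite author's own statement) =====
-- stated objective: alternative
-- what changed: The recursive accumulator-threading DFS is replaced by an iterative worklist: an explicit stack of pending prefixes popped in a while loop, children pushed in reverse alphabet order so the pre-order output order is preserved.
import Mathlib
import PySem

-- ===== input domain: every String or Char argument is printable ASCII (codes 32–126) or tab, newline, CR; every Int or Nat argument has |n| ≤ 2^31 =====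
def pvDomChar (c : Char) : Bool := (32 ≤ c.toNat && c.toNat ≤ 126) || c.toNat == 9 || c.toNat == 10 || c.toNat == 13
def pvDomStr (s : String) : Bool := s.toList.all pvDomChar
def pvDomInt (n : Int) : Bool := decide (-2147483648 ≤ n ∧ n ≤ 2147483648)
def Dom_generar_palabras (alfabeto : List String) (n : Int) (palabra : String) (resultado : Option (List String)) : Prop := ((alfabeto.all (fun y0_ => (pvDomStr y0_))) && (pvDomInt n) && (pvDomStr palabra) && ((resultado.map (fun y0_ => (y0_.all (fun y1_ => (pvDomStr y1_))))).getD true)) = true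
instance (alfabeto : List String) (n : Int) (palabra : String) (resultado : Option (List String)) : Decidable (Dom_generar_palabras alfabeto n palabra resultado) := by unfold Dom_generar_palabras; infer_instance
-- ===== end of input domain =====

-- B replaces A's recursive accumulator-threading DFS by an iterative worklist: an explicit stack
-- of pending prefixes popped in a while loop, children pushed in reverse alphabet order so the
-- pre-order output order is preserved; like A, B extends the caller-supplied `resultado` list in
-- place (the equivalence proved here is about the return value).

-- ===== PORT A =====
-- A's Python recursion is unbounded on inputs where a word can overshoot or never reach n
-- (RecursionError); the fuel argument is only a totality guard: under Pre_ every recursive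
-- call grows the word by at least one character and the recursion stops at length n, so the
-- fuel (remaining length + 1) is never exhausted.
def generar_palabras_go (alfabeto : List String) (n : Int) (fuel : Nat) (palabra : String) (resultado : List String) : List String :=
  match fuel with
  | 0 => resultado
  | f + 1 =>
    let resultado :=
      if PySem.Str.len palabra ≤ n then
        if (PySem.Str.count palabra "a") % 2 = 0 ∧ (PySem.Str.count palabra "b") % 2 = 0 then
          resultado ++ [palabra]
        else resultado
      else resultado
    if PySem.Str.len palabra = n then resultado
    else alfabeto.foldl (fun acc simbolo => generar_palabras_go alfabeto n f (palabra ++ simbolo) acc) resultado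

def generar_palabras (alfabeto : List String) (n : Int) (palabra : String) (resultado : Option (List String)) : List String :=
  let res := match resultado with | none => [] | some r => r
  generar_palabras_go alfabeto n ((n - PySem.Str.len palabra).toNat + 1) palabra res

-- ===== PORT B =====
-- B's while loop: pop a prefix w off the stack, emit it if it qualifies, and unless len w = n
-- push each extension w ++ s in reverse alphabet order (so the first symbol is popped first).
-- The fuel is only a totality guard for the same pathological non-termination as A's recursion:
-- under Pre_ the number of pops is bounded by (|alfabeto|+1)^(remaining length), so it is never
-- exhausted.
def generar_palabras_alt_loop (alfabeto : List String) (n : Int) : Nat → List String → List String → List String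
  | 0, _, out => out
  | _ + 1, [], out => out
  | f + 1, w :: stack, out =>
    let out :=
      if PySem.Str.len w ≤ n ∧ (PySem.Str.count w "a") % 2 = 0 ∧ (PySem.Str.count w "b") % 2 = 0 then
        out ++ [w]
      else out
    let stack :=
      if PySem.Str.len w ≠ n then
        alfabeto.reverse.foldl (fun st simbolo => (w ++ simbolo) :: st) stack
      else stack
    generar_palabras_alt_loop alfabeto n f stack out

def generar_palabras_alt (alfabeto : List String) (n : Int) (palabra : String) (resultado : Option (List String)) : List String :=
  generar_palabras_alt_loop alfabeto n
    ((alfabeto.length + 1) ^ (n - PySem.Str.len palabra).toNat)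
    [palabra] (resultado.getD [])

-- ===== PRECONDITION & SPEC =====
-- The common length of the alphabet's symbols (read off the first symbol; 1 for an empty alphabet).
def pvL (alf : List String) : Int := ((alf.head?).map PySem.Str.len).getD 1

-- Pre_ excludes exactly the inputs on which A's unbounded recursion never returns (RecursionError):
-- a nonempty alphabet that cannot tile the remaining length n - len(palabra) exactly (an empty or
-- non-uniform-length symbol set with something left to fill, a start word longer than n, or a uniform
-- symbol length that does not divide the remaining length).
def Pre_generar_palabras (alfabeto : List String) (n : Int) (palabra : String) (resultado : Option (List String)) : Prop :=
  alfabeto = [] ∨ PySem.Str.len palabra = n ∨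
    (PySem.Str.len palabra ≤ n ∧ 1 ≤ pvL alfabeto ∧ (∀ s ∈ alfabeto, PySem.Str.len s = pvL alfabeto) ∧
      (n - PySem.Str.len palabra) % pvL alfabeto = 0)
instance (alfabeto : List String) (n : Int) (palabra : String) (resultado : Option (List String)) : Decidable (Pre_generar_palabras alfabeto n palabra resultado) := by unfold Pre_generar_palabras; infer_instance

def pvWitness_generar_palabras : List String × Int × String × Option (List String) := (["a", "b"], 2, "", none)

def Spec_generar_palabras (alfabeto : List String) (n : Int) (palabra : String) (resultado : Option (List String)) (out : List String) : Prop := out = generar_palabras_alt alfabeto n palabra resultado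
instance (alfabeto : List String) (n : Int) (palabra : String) (resultado : Option (List String)) (out : List String) : Decidable (Spec_generar_palabras alfabeto n palabra resultado out) := by unfold Spec_generar_palabras; infer_instance

-- ===== CLAIM (what is proved, stated in full; the proofs are below) =====
def Claim_equal_generar_palabras : Prop := ∀ (alfabeto : List String) (n : Int) (palabra : String) (resultado : Option (List String)), Dom_generar_palabras alfabeto n palabra resultado → Pre_generar_palabras alfabeto n palabra resultado → Spec_generar_palabras alfabeto n palabra resultado (generar_palabras alfabeto n palabra resultado)

-- ===== LEMMAS AND PROOFS =====

-- The qualifying-word singleton both programs append.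
def pvSing (n : Int) (w : String) : List String :=
  if PySem.Str.len w ≤ n ∧ (PySem.Str.count w "a") % 2 = 0 ∧ (PySem.Str.count w "b") % 2 = 0 then [w] else []

-- The pre-order word list of the subtree below w, q levels deep (proof-side reference function).
def pvP (alf : List String) (n : Int) : Nat → String → List String
  | 0, w => pvSing n w
  | q + 1, w => pvSing n w ++ alf.flatMap (fun s => pvP alf n q (w ++ s))

-- Node count of a q-level subtree over an a-letter alphabet.
def pvS (a : Nat) : Nat → Nat
  | 0 => 1
  | q + 1 => 1 + a * pvS a q

lemma pvS_le_pow (a q : Nat) : pvS a q ≤ (a + 1) ^ q := by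
  induction q with
  | zero => simp [pvS]
  | succ q ih =>
    have h1 : 1 ≤ (a + 1) ^ q := Nat.one_le_pow _ _ (by omega)
    calc pvS a (q + 1) = 1 + a * pvS a q := rfl
      _ ≤ 1 * (a + 1) ^ q + a * (a + 1) ^ q := by
          have := Nat.mul_le_mul_left a ih; omega
      _ = (a + 1) ^ (q + 1) := by ring

-- A's nested append guard equals appending the guarded singleton.
lemma pv_hrA (n : Int) (w : String) (acc : List String) :
    (if PySem.Str.len w ≤ n then
       if (PySem.Str.count w "a") % 2 = 0 ∧ (PySem.Str.count w "b") % 2 = 0 then acc ++ [w] else acc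
     else acc)
      = acc ++ pvSing n w := by
  unfold pvSing
  by_cases hA : PySem.Str.len w ≤ n
  · by_cases hB : (PySem.Str.count w "a") % 2 = 0 ∧ (PySem.Str.count w "b") % 2 = 0
    · rw [if_pos hA, if_pos hB, if_pos ⟨hA, hB.1, hB.2⟩]
    · rw [if_pos hA, if_neg hB, if_neg (by tauto), List.append_nil]
  · rw [if_neg hA, if_neg (by tauto), List.append_nil]

-- B's flat append guard equals appending the guarded singleton.
lemma pv_hrB (n : Int) (w : String) (out : List String) :
    (if PySem.Str.len w ≤ n ∧ (PySem.Str.count w "a") % 2 = 0 ∧ (PySem.Str.count w "b") % 2 = 0 then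
       out ++ [w]
     else out)
      = out ++ pvSing n w := by
  unfold pvSing; split_ifs <;> simp

-- Pushing the reversed alphabet one by one prepends the extensions in alphabet order.
lemma pv_push (w : String) (l st : List String) :
    l.reverse.foldl (fun st s => (w ++ s) :: st) st = l.map (fun s => w ++ s) ++ st := by
  induction l generalizing st with
  | nil => simp
  | cons x xs ih => simp [List.foldl_append, ih]

lemma pv_loop_nil (alf : List String) (n : Int) (f : Nat) (out : List String) :
    generar_palabras_alt_loop alf n f [] out = out := by
  cases f <;> rfl

-- A's for-loop over a symbol list, with the inductive hypothesis at depth q', flattens out.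
lemma pv_foldA (alf : List String) (n : Int) (L : Int) (f q' : Nat)
    (hih : ∀ w acc, q' < f → PySem.Str.len w ≤ n → n - PySem.Str.len w = (q' : Int) * L →
      generar_palabras_go alf n f w acc = acc ++ pvP alf n q' w)
    (hf : q' < f) :
    ∀ (l : List String), (∀ s ∈ l, PySem.Str.len s = L) →
    ∀ (w : String) (acc : List String), n - PySem.Str.len w = ((q' : Int) + 1) * L → 1 ≤ L →
      l.foldl (fun acc s => generar_palabras_go alf n f (w ++ s) acc) acc
        = acc ++ l.flatMap (fun s => pvP alf n q' (w ++ s)) := by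
  intro l
  induction l with
  | nil => simp
  | cons x xs ih =>
    intro hlen w acc hq hL
    have hx : PySem.Str.len (w ++ x) = PySem.Str.len w + L := by
      rw [PySem.Str.len_append, hlen x (by simp)]
    have hq' : n - PySem.Str.len (w ++ x) = (q' : Int) * L := by rw [hx]; linarith [hq]
    have hle : PySem.Str.len (w ++ x) ≤ n := by
      have h0 : (0 : Int) ≤ (q' : Int) * L := mul_nonneg (by positivity) (by omega)
      linarith [hq']
    simp only [List.foldl_cons, List.flatMap_cons]
    rw [hih _ _ hf hle hq', ih (fun s hs => hlen s (by simp [hs])) w _ hq hL, List.append_assoc]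

-- A's recursion returns acc ++ the pre-order subtree list.
lemma pv_goA (alf : List String) (n : Int) (L : Int) (hL : 1 ≤ L)
    (half : ∀ s ∈ alf, PySem.Str.len s = L) :
    ∀ (q f : Nat) (w : String) (acc : List String), q < f → PySem.Str.len w ≤ n →
      n - PySem.Str.len w = (q : Int) * L →
      generar_palabras_go alf n f w acc = acc ++ pvP alf n q w := by
  intro q
  induction q with
  | zero =>
    intro f w acc hf hle hq
    obtain ⟨f', rfl⟩ := Nat.exists_eq_succ_of_ne_zero (by omega : f ≠ 0)
    have hn : PySem.Str.len w = n := by push_cast at hq; linarith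
    show (let r := if PySem.Str.len w ≤ n then
            if (PySem.Str.count w "a") % 2 = 0 ∧ (PySem.Str.count w "b") % 2 = 0 then acc ++ [w] else acc
          else acc;
          if PySem.Str.len w = n then r
          else alf.foldl (fun a s => generar_palabras_go alf n f' (w ++ s) a) r)
        = acc ++ pvP alf n 0 w
    rw [pvP]
    simp only [pv_hrA n w acc, if_pos hn]
  | succ q ih =>
    intro f w acc hf hle hq
    obtain ⟨f', rfl⟩ := Nat.exists_eq_succ_of_ne_zero (by omega : f ≠ 0)
    have hn : PySem.Str.len w ≠ n := by
      intro h
      rw [h] at hq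
      have : ((q : Int) + 1) * L ≥ 1 := by nlinarith
      push_cast at hq; omega
    show (let r := if PySem.Str.len w ≤ n then
            if (PySem.Str.count w "a") % 2 = 0 ∧ (PySem.Str.count w "b") % 2 = 0 then acc ++ [w] else acc
          else acc;
          if PySem.Str.len w = n then r
          else alf.foldl (fun a s => generar_palabras_go alf n f' (w ++ s) a) r)
        = acc ++ pvP alf n (q + 1) w
    rw [pvP]
    simp only [pv_hrA n w acc, if_neg hn]
    rw [pv_foldA alf n L f' q (fun w acc h1 h2 h3 => ih f' w acc h1 h2 h3) (by omega) alf half w _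
      (by push_cast at hq ⊢; linarith) hL, List.append_assoc]

-- B's stack loop pops w's whole subtree, consuming exactly pvS alf.length q fuel.
lemma pv_loopB (alf : List String) (n : Int) (L : Int) (hL : 1 ≤ L)
    (half : ∀ s ∈ alf, PySem.Str.len s = L) :
    ∀ (q f : Nat) (w : String) (rest out : List String), PySem.Str.len w ≤ n →
      n - PySem.Str.len w = (q : Int) * L →
      generar_palabras_alt_loop alf n (pvS alf.length q + f) (w :: rest) out
        = generar_palabras_alt_loop alf n f rest (out ++ pvP alf n q w) := by
  intro q
  induction q with
  | zero =>
    intro f w rest out hle hq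
    have hn : PySem.Str.len w = n := by push_cast at hq; linarith
    rw [show pvS alf.length 0 + f = f + 1 by simp [pvS, Nat.add_comm]]
    show (let out' := if PySem.Str.len w ≤ n ∧ (PySem.Str.count w "a") % 2 = 0 ∧ (PySem.Str.count w "b") % 2 = 0 then out ++ [w] else out;
          let st := if PySem.Str.len w ≠ n then alf.reverse.foldl (fun st s => (w ++ s) :: st) rest else rest;
          generar_palabras_alt_loop alf n f st out')
        = generar_palabras_alt_loop alf n f rest (out ++ pvP alf n 0 w)
    rw [pvP]
    simp only [pv_hrB n w out, if_neg (not_not_intro hn)]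
  | succ q ih =>
    intro f w rest out hle hq
    have hn : PySem.Str.len w ≠ n := by
      intro h
      rw [h] at hq
      have : ((q : Int) + 1) * L ≥ 1 := by nlinarith
      push_cast at hq; omega
    have hS : pvS alf.length (q + 1) + f = (alf.length * pvS alf.length q + f) + 1 := by
      simp [pvS]; omega
    rw [hS]
    show (let out' := if PySem.Str.len w ≤ n ∧ (PySem.Str.count w "a") % 2 = 0 ∧ (PySem.Str.count w "b") % 2 = 0 then out ++ [w] else out;
          let st := if PySem.Str.len w ≠ n then alf.reverse.foldl (fun st s => (w ++ s) :: st) rest else rest;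
          generar_palabras_alt_loop alf n (alf.length * pvS alf.length q + f) st out')
        = generar_palabras_alt_loop alf n f rest (out ++ pvP alf n (q + 1) w)
    simp only [pv_hrB n w out, if_pos hn, pv_push]
    -- chain over the alphabet: each child pops its own subtree
    have chain : ∀ (l : List String), (∀ s ∈ l, PySem.Str.len s = L) →
        ∀ (f' : Nat) (rest' out' : List String),
        generar_palabras_alt_loop alf n (l.length * pvS alf.length q + f')
            (l.map (fun s => w ++ s) ++ rest') out'
          = generar_palabras_alt_loop alf n f' rest'
              (out' ++ l.flatMap (fun s => pvP alf n q (w ++ s))) := by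
      intro l
      induction l with
      | nil => simp
      | cons x xs ihl =>
        intro hlen f' rest' out'
        have hx : PySem.Str.len (w ++ x) = PySem.Str.len w + L := by
          rw [PySem.Str.len_append, hlen x (by simp)]
        have hq' : n - PySem.Str.len (w ++ x) = (q : Int) * L := by rw [hx]; push_cast at hq ⊢; linarith
        have hle' : PySem.Str.len (w ++ x) ≤ n := by
          have h0 : (0 : Int) ≤ (q : Int) * L := mul_nonneg (by positivity) (by omega)
          linarith [hq']
        have harith : (x :: xs).length * pvS alf.length q + f'
            = pvS alf.length q + (xs.length * pvS alf.length q + f') := by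
          simp [List.length_cons]; ring
        rw [harith]
        simp only [List.map_cons, List.cons_append, List.flatMap_cons]
        rw [ih _ _ _ _ hle' hq', ihl (fun s hs => hlen s (by simp [hs])), List.append_assoc]
    rw [pvP]
    rw [chain alf half f rest _, List.append_assoc]

-- One pop with an empty continuation: a single node is emitted.
lemma pv_loop_one (alf : List String) (n : Int) (w : String) (out : List String) :
    generar_palabras_alt_loop alf n 1 [w] out = out ++ pvSing n w := by
  show (let out' := if PySem.Str.len w ≤ n ∧ (PySem.Str.count w "a") % 2 = 0 ∧ (PySem.Str.count w "b") % 2 = 0 then out ++ [w] else out;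
        let st := if PySem.Str.len w ≠ n then alf.reverse.foldl (fun st s => (w ++ s) :: st) ([] : List String) else [];
        generar_palabras_alt_loop alf n 0 st out')
      = out ++ pvSing n w
  simp only [pv_hrB n w out]
  rfl

-- ===== VERDICT (by name: the statement is the Claim_ definition above) =====
theorem generar_palabras_spec : Claim_equal_generar_palabras := by
  intro alfabeto n palabra resultado _hdom hpre
  unfold Spec_generar_palabras generar_palabras generar_palabras_alt
  have hres : ∀ (o : Option (List String)), (match o with | none => ([] : List String) | some r => r) = o.getD [] := by
    intro o; cases o <;> rfl
  rw [hres]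
  set res := resultado.getD [] with hres'
  rcases hpre with hnil | hn | ⟨hle, hL, half, hmod⟩
  · -- empty alphabet: a single node is visited by both programs
    subst hnil
    simp only [List.length_nil, zero_add, one_pow, pv_loop_one]
    rw [generar_palabras_go]
    simp only [pv_hrA, List.foldl_nil]
    split_ifs <;> rfl
  · -- the start word already has length n: one node each
    rw [hn]
    simp only [sub_self, Int.toNat_zero, pow_zero, pv_loop_one]
    rw [generar_palabras_go]
    simp only [pv_hrA, if_pos hn]
  · -- main case: uniform symbol length L tiling the remaining length
    set L := pvL alfabeto with hLdef
    set d : Int := n - PySem.Str.len palabra with hd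
    have hd0 : 0 ≤ d := by omega
    have hdvd : L ∣ d := Int.dvd_of_emod_eq_zero hmod
    set q : Nat := (d / L).toNat with hq
    have hdivnn : 0 ≤ d / L := Int.ediv_nonneg hd0 (by omega)
    have hqL : n - PySem.Str.len palabra = (q : Int) * L := by
      rw [hq, Int.toNat_of_nonneg hdivnn, Int.ediv_mul_cancel hdvd]
    have hqd : (q : Int) ≤ d := by
      have : (q : Int) * 1 ≤ (q : Int) * L := by
        apply mul_le_mul_of_nonneg_left hL (by positivity)
      omega
    have hqd' : q ≤ d.toNat := by omega
    rw [pv_goA alfabeto n L hL half q (d.toNat + 1) palabra res (by omega) hle hqL]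
    have hF : pvS alfabeto.length q ≤ (alfabeto.length + 1) ^ d.toNat := by
      calc pvS alfabeto.length q ≤ (alfabeto.length + 1) ^ q := pvS_le_pow _ _
        _ ≤ (alfabeto.length + 1) ^ d.toNat := Nat.pow_le_pow_right (by omega) hqd'
    have hFe : (alfabeto.length + 1) ^ d.toNat
        = pvS alfabeto.length q + ((alfabeto.length + 1) ^ d.toNat - pvS alfabeto.length q) := by
      omega
    rw [hFe, pv_loopB alfabeto n L hL half q _ palabra [] res hle hqL, pv_loop_nil]
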